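-- pv_equiv track=rewrite | github.com/bhargav191098/AI-HW3 | homework.py | negateClause
-- ===== SOURCE A (Python) =====
-- def negateClause(clause:str) -> str:
--     ans = str()
--     if "&" in clause and not "|" in clause:
--         and_terms = clause.split("&")
--         for term in and_terms:
--             if(ans==""):
--                 ans = "~"+term
--             else:
--                 ans = ans + "|" + "~" + term
--         return ans
--     elif "|" in clause and not "&" in clause:
--         or_terms = clause.split("|")
--         for term in or_terms:
--             if(ans==""):
--                 ans = "~"+term
--             else:
--                 ans = ans +"&"+"~"+term
--         return ans
--     else:
--         #First step, we split the clause by all the OR terms it contains.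
--         or_terms = clause.split("|")
--         for term in or_terms:
--             sub_ans = str()
--             if('&' in term):
--                 and_terms = term.split("&")
--                 for literal in and_terms:
--                     if(sub_ans == ""):
--                         sub_ans = sub_ans+"~"+literal
--                     else:
--                         sub_ans = sub_ans + "|" + "~"+literal
--             else:
--                 sub_ans = "~"+term
--             if(ans==""):
--                 ans = ans + sub_ans
--             else:
--                 ans = ans + "&" + sub_ans
--     return ans
-- ===== SOURCE B (Python) =====
-- def negateClause(clause: str) -> str:
--     out = ["~"]
--     for ch in clause:
--         if ch == '&':
--             out.append("|~")
--         elif ch == '|':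
--             out.append("&~")
--         else:
--             out.append(ch)
--     return "".join(out)
-- ===== Notes on version B (the rewrite author's own statement) =====
-- stated objective: simpler
-- what changed: Replaced A's three-branch split-and-rejoin (splitting the string on the operator characters and re-joining negated tokens, with a nested inner split) by a single character scan that emits a leading negation sign and then swaps each AND operator for OR-plus-negation and each OR operator for AND-plus-negation, copying every other character unchanged.
import Mathlib
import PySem

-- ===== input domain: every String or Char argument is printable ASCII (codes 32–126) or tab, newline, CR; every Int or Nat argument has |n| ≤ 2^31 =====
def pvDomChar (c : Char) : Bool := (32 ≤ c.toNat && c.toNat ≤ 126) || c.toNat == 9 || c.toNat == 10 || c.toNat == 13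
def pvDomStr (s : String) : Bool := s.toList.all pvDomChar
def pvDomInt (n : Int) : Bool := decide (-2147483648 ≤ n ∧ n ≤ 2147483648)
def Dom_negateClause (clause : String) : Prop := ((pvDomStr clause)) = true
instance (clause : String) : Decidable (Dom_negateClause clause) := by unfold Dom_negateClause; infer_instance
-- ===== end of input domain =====

-- B negates the clause by a single character scan (swap operators, prepend '~' to tokens)
-- instead of A's split-and-rebuild with three branches; objective: simpler, one pass.

-- ===== PORT A =====
-- A's inner accumulation: ans = "~"+term when ans is empty, else ans + sep + "~" + term
def pvAnsStep (sep : Char) (ans term : List Char) : List Char :=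
  if ans = [] then '~' :: term else ans ++ sep :: '~' :: term

def negateClause (clause : String) : String :=
  let cs := clause.toList
  if PySem.Chars.isIn ['&'] cs && !(PySem.Chars.isIn ['|'] cs) then
    String.mk ((PySem.Chars.splitOn cs ['&']).foldl (pvAnsStep '|') [])
  else if PySem.Chars.isIn ['|'] cs && !(PySem.Chars.isIn ['&'] cs) then
    String.mk ((PySem.Chars.splitOn cs ['|']).foldl (pvAnsStep '&') [])
  else
    String.mk ((PySem.Chars.splitOn cs ['|']).foldl
      (fun ans term =>
        let sub := if PySem.Chars.isIn ['&'] term then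
            (PySem.Chars.splitOn term ['&']).foldl (pvAnsStep '|') []
          else '~' :: term
        if ans = [] then ans ++ sub else ans ++ '&' :: sub) [])

-- ===== PORT B =====
def negateClause_alt (clause : String) : String :=
  String.mk (clause.toList.foldl
    (fun acc c =>
      acc ++ (if c = '&' then ['|', '~'] else if c = '|' then ['&', '~'] else [c]))
    ['~'])

-- ===== PRECONDITION & SPEC =====
def Spec_negateClause (clause : String) (out : String) : Prop := out = negateClause_alt clause
instance (clause : String) (out : String) : Decidable (Spec_negateClause clause out) := by unfold Spec_negateClause; infer_instance

-- ===== CLAIM (what is proved, stated in full; the proofs are below) =====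
def Claim_equal_negateClause : Prop := ∀ (clause : String), Dom_negateClause clause → Spec_negateClause clause (negateClause clause)

-- ===== LEMMAS AND PROOFS =====

-- B's per-character substitution
def pvF (c : Char) : List Char :=
  if c = '&' then ['|', '~'] else if c = '|' then ['&', '~'] else [c]

-- structural recursion computing (head piece, remaining pieces) of a single-char split
def pvMsp (s : Char) : List Char → List Char × List (List Char)
  | [] => ([], [])
  | c :: cs =>
    let p := pvMsp s cs
    if c = s then ([], p.1 :: p.2) else (c :: p.1, p.2)

theorem pvGo_spec (s : Char) :
    ∀ (fuel : Nat) (l cur : List Char) (acc : List (List Char)) (_ : l.length ≤ fuel),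
      PySem.Chars.splitOn.go [s] fuel l cur acc =
        acc.reverse ++ (cur.reverse ++ (pvMsp s l).1) :: (pvMsp s l).2 := by
  intro fuel
  induction fuel with
  | zero =>
    intro l cur acc h
    have : l = [] := List.length_eq_zero_iff.mp (Nat.le_zero.mp h)
    subst this
    simp [PySem.Chars.splitOn.go, pvMsp]
  | succ n ih =>
    intro l cur acc h
    cases l with
    | nil => simp [PySem.Chars.splitOn.go, pvMsp]
    | cons c rest =>
      by_cases hc : s = c
      · subst hc
        simp only [PySem.Chars.splitOn.go, List.isPrefixOf, List.length]
        rw [if_pos (by simp)]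
        simp only [List.drop_succ_cons, List.drop_zero]
        rw [ih rest [] (cur.reverse :: acc) (by simpa using Nat.le_of_succ_le_succ h)]
        simp [pvMsp]
      · simp only [PySem.Chars.splitOn.go, List.isPrefixOf]
        rw [if_neg (by simp [hc])]
        rw [ih rest (c :: cur) acc (by simpa using Nat.le_of_succ_le_succ h)]
        simp [pvMsp, Ne.symm hc]

theorem pvSplitOn_eq (s : Char) (cs : List Char) :
    PySem.Chars.splitOn cs [s] = (pvMsp s cs).1 :: (pvMsp s cs).2 := by
  unfold PySem.Chars.splitOn
  rw [pvGo_spec s (cs.length + 1) cs [] [] (Nat.le_succ _)]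
  simp

-- a fold that appends once the accumulator is nonempty is init ++ flatMap
theorem pvFoldl_ne_nil (v u : List Char → List Char) :
    ∀ (ps : List (List Char)) (ans : List Char), ans ≠ [] →
      ps.foldl (fun a t => if a = [] then v t else a ++ u t) ans
        = ans ++ ps.flatMap u := by
  intro ps
  induction ps with
  | nil => intro ans _; simp
  | cons p ps ih =>
    intro ans hne
    simp only [List.foldl_cons, if_neg hne]
    rw [ih (ans ++ u p) (by simp [hne])]
    simp

theorem pvFoldl_ansStep (sep : Char) (p : List Char) (ps : List (List Char)) :
    (p :: ps).foldl (pvAnsStep sep) [] = '~' :: p ++ ps.flatMap (fun t => sep :: '~' :: t) := by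
  have h : ∀ (a t : List Char), pvAnsStep sep a t =
      if a = [] then '~' :: t else a ++ (fun t => sep :: '~' :: t) t := by
    intro a t; rfl
  simp only [List.foldl_cons, pvAnsStep, if_pos rfl]
  have := pvFoldl_ne_nil (fun t => '~' :: t) (fun t => sep :: '~' :: t) ps ('~' :: p) (by simp)
  simpa [pvAnsStep] using this

-- singleton-substring membership
theorem pvIsIn_singleton (c : Char) (t : List Char) :
    PySem.Chars.isIn [c] t = true ↔ c ∈ t := by
  rw [PySem.Chars.isIn_iff_infix]
  constructor
  · rintro ⟨l, r, h⟩
    exact h ▸ (by simp)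
  · intro h
    obtain ⟨l, r, hl⟩ := List.append_of_mem h
    exact ⟨l, r, by rw [hl]; simp⟩

-- the pieces of a split by s contain no s
theorem pvMsp_not_mem (s : Char) :
    ∀ cs : List Char, s ∉ (pvMsp s cs).1 ∧ ∀ t ∈ (pvMsp s cs).2, s ∉ t := by
  intro cs
  induction cs with
  | nil => simp [pvMsp]
  | cons c cs ih =>
    by_cases hc : c = s
    · subst hc
      simp only [pvMsp, if_pos rfl]
      exact ⟨by simp, by
        intro t ht
        rcases List.mem_cons.mp ht with rfl | ht
        · exact ih.1
        · exact ih.2 t ht⟩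
    · simp only [pvMsp, if_neg hc]
      exact ⟨by
        intro hmem
        rcases List.mem_cons.mp hmem with h | h
        · exact hc h.symm
        · exact ih.1 h, ih.2⟩

-- flatMap pvF across a split by '&' when '|' is absent
theorem pvClaim1 (cs : List Char) (h : '|' ∉ cs) :
    cs.flatMap pvF = (pvMsp '&' cs).1 ++ ((pvMsp '&' cs).2).flatMap (fun t => '|' :: '~' :: t) := by
  induction cs with
  | nil => simp [pvMsp]
  | cons c cs ih =>
    have hc' : c ≠ '|' := fun hh => h (hh ▸ List.mem_cons_self)
    have hcs : '|' ∉ cs := fun hh => h (List.mem_cons_of_mem _ hh)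
    by_cases hc : c = '&'
    · subst hc
      simp only [pvMsp, if_pos rfl, List.flatMap_cons, pvF, if_pos rfl]
      rw [ih hcs]; simp
    · simp only [pvMsp, if_neg hc, List.flatMap_cons, pvF, if_neg hc, if_neg hc']
      rw [ih hcs]; simp

-- flatMap pvF across a split by '|' when '&' is absent
theorem pvClaim2 (cs : List Char) (h : '&' ∉ cs) :
    cs.flatMap pvF = (pvMsp '|' cs).1 ++ ((pvMsp '|' cs).2).flatMap (fun t => '&' :: '~' :: t) := by
  induction cs with
  | nil => simp [pvMsp]
  | cons c cs ih =>
    have hc' : c ≠ '&' := fun hh => h (hh ▸ List.mem_cons_self)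
    have hcs : '&' ∉ cs := fun hh => h (List.mem_cons_of_mem _ hh)
    by_cases hc : c = '|'
    · subst hc
      simp only [pvMsp, if_pos rfl, List.flatMap_cons, pvF, if_neg (by decide : ¬('|' = '&')), if_pos rfl]
      rw [ih hcs]; simp
    · simp only [pvMsp, if_neg hc, List.flatMap_cons, pvF, if_neg hc', if_neg hc]
      rw [ih hcs]; simp

-- flatMap pvF across a split by '|' in general
theorem pvClaim3 (cs : List Char) :
    cs.flatMap pvF = ((pvMsp '|' cs).1).flatMap pvF
      ++ ((pvMsp '|' cs).2).flatMap (fun t => '&' :: '~' :: t.flatMap pvF) := by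
  induction cs with
  | nil => simp [pvMsp]
  | cons c cs ih =>
    by_cases hc : c = '|'
    · subst hc
      simp only [pvMsp, if_pos rfl, List.flatMap_cons]
      rw [ih]
      simp [pvF]
    · simp only [pvMsp, if_neg hc, List.flatMap_cons]
      rw [ih]; simp

-- pvF is the identity on operator-free text
theorem pvFlatMap_id (t : List Char) (h1 : '|' ∉ t) (h2 : '&' ∉ t) :
    t.flatMap pvF = t := by
  induction t with
  | nil => simp
  | cons c t ih =>
    have hc1 : c ≠ '&' := fun hh => h2 (hh ▸ List.mem_cons_self)
    have hc2 : c ≠ '|' := fun hh => h1 (hh ▸ List.mem_cons_self)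
    simp only [List.flatMap_cons, pvF, if_neg hc1, if_neg hc2]
    rw [ih (fun hh => h1 (List.mem_cons_of_mem _ hh)) (fun hh => h2 (List.mem_cons_of_mem _ hh))]
    rfl

-- A's inner sub_ans equals '~' :: term.flatMap pvF on a '|'-free term
theorem pvSub_eq (term : List Char) (h : '|' ∉ term) :
    (if PySem.Chars.isIn ['&'] term then
        (PySem.Chars.splitOn term ['&']).foldl (pvAnsStep '|') []
      else '~' :: term) = '~' :: term.flatMap pvF := by
  by_cases hin : '&' ∈ term
  · rw [if_pos ((pvIsIn_singleton '&' term).mpr hin)]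
    rw [pvSplitOn_eq, pvFoldl_ansStep, pvClaim1 term h]
    simp
  · have hb : PySem.Chars.isIn ['&'] term = false := by
      rw [← Bool.not_eq_true]; simp [pvIsIn_singleton, hin]
    simp only [hb, Bool.false_eq_true, if_false]
    rw [pvFlatMap_id term h hin]

-- B's fold is '~' :: flatMap
theorem pvAlt_chars (cs : List Char) :
    cs.foldl (fun acc c => acc ++ pvF c) ['~'] = '~' :: cs.flatMap pvF := by
  rw [PySem.List.foldl_append_eq_flatMap]
  simp

-- ===== VERDICT (by name: the statement is the Claim_ definition above) =====
theorem negateClause_spec : Claim_equal_negateClause := by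
  intro clause _
  unfold Spec_negateClause negateClause negateClause_alt
  have halt : clause.toList.foldl
      (fun acc c => acc ++ (if c = '&' then ['|', '~'] else if c = '|' then ['&', '~'] else [c]))
      ['~'] = '~' :: clause.toList.flatMap pvF := by
    have := pvAlt_chars clause.toList
    simpa [pvF] using this
  set cs := clause.toList with hcs
  by_cases h1 : PySem.Chars.isIn ['&'] cs = true ∧ PySem.Chars.isIn ['|'] cs = false
  · rw [if_pos (by simp [h1.1, h1.2])]
    rw [pvSplitOn_eq, pvFoldl_ansStep]
    rw [halt]
    have hno : '|' ∉ cs := by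
      intro hmem
      have := (pvIsIn_singleton '|' cs).mpr hmem
      simp [h1.2] at this
    rw [pvClaim1 cs hno]
    simp
  · rw [if_neg (by
      intro hb
      apply h1
      constructor
      · exact (Bool.and_eq_true _ _).mp hb |>.1
      · have := (Bool.and_eq_true _ _).mp hb |>.2
        simpa using this)]
    by_cases h2 : PySem.Chars.isIn ['|'] cs = true ∧ PySem.Chars.isIn ['&'] cs = false
    · rw [if_pos (by simp [h2.1, h2.2])]
      rw [pvSplitOn_eq, pvFoldl_ansStep]
      rw [halt]
      have hno : '&' ∉ cs := by
        intro hmem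
        have := (pvIsIn_singleton '&' cs).mpr hmem
        simp [h2.2] at this
      rw [pvClaim2 cs hno]
      simp
    · rw [if_neg (by
        intro hb
        apply h2
        constructor
        · exact (Bool.and_eq_true _ _).mp hb |>.1
        · have := (Bool.and_eq_true _ _).mp hb |>.2
          simpa using this)]
      rw [pvSplitOn_eq]
      have hpieces := pvMsp_not_mem '|' cs
      -- rewrite the general-branch fold
      have hfold :
          ((pvMsp '|' cs).1 :: (pvMsp '|' cs).2).foldl
            (fun ans term =>
              let sub := if PySem.Chars.isIn ['&'] term then
                  (PySem.Chars.splitOn term ['&']).foldl (pvAnsStep '|') []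
                else '~' :: term
              if ans = [] then ans ++ sub else ans ++ '&' :: sub) []
          = ('~' :: ((pvMsp '|' cs).1).flatMap pvF)
            ++ ((pvMsp '|' cs).2).flatMap (fun t => '&' :: '~' :: t.flatMap pvF) := by
      -- first iteration then the nonempty-accumulator fold
        simp only [List.foldl_cons]
        rw [pvSub_eq _ hpieces.1]
        simp only [reduceIte, List.nil_append]
        have hcongr : ∀ (ps : List (List Char)), (∀ t ∈ ps, '|' ∉ t) →
            ∀ (ans : List Char), ans ≠ [] →
            ps.foldl
              (fun ans term =>
                let sub := if PySem.Chars.isIn ['&'] term then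
                    (PySem.Chars.splitOn term ['&']).foldl (pvAnsStep '|') []
                  else '~' :: term
                if ans = [] then ans ++ sub else ans ++ '&' :: sub) ans
            = ans ++ ps.flatMap (fun t => '&' :: '~' :: t.flatMap pvF) := by
          intro ps
          induction ps with
          | nil => intro _ ans _; simp
          | cons p ps ih =>
            intro hps ans hne
            simp only [List.foldl_cons, if_neg hne]
            rw [pvSub_eq p (hps p List.mem_cons_self)]
            rw [ih (fun t ht => hps t (List.mem_cons_of_mem _ ht)) _ (by simp [hne])]
            simp
        rw [hcongr (pvMsp '|' cs).2 hpieces.2 _ (by simp)]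
      rw [hfold, halt, pvClaim3 cs]
      simp
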